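-- pv_equiv track=rewrite | github.com/Allan0092/ProgrammingForDevelopers | Question1/Question1A.py | all_possible_themes
-- ===== SOURCE A (Python) =====
-- def all_possible_themes(costs: list[list[int]]) -> list[list]:
--     """Generates all the possible lists of combination and stores the index with respect to the adjacency constraint.
--
--     Args:
--         costs (list[list[int]]): the cost of decorating the venue.
--
--     Returns:
--         list[list]: the list of all possible combinations of themes.
--     """
--     def generate_combinations(curr_index, prev_index, result):
--         if len(curr_index) == len(costs):
--             result.append(curr_index.copy())
--             return
--         for i in range(len(costs[len(curr_index)])): # loop according to the number of themes in a venue.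
--             if i != prev_index: # adjacency constraint.
--                 curr_index.append(i) # add the index to the list.
--                 generate_combinations(curr_index, i, result)
--                 curr_index.pop()
--     result = [] # initialize with a empty list.
--     generate_combinations([], -1, result) # function call
--     return result
-- ===== SOURCE B (Python) =====
-- def all_possible_themes(costs: list[list[int]]) -> list[list]:
--     """Iterative layer-by-layer build of all index combinations under the
--     adjacency constraint (no two consecutive rows pick the same index)."""
--     partials = [[]]
--     for row in costs:
--         new_partials = []
--         for p in partials:
--             prev = p[-1] if p else -1
--             for i in range(len(row)):
--                 if i != prev:
--                     new_partials.append(p + [i])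
--         partials = new_partials
--     return partials
-- ===== Notes on version B (the rewrite author's own statement) =====
-- stated objective: alternative
-- what changed: Replaces the recursive backtracking DFS (mutable current-path with append/pop and an accumulator list) by an iterative layer-by-layer breadth build: start from the single empty partial and for each row extend every partial by each admissible index, preserving the exact lexicographic output order.
import Mathlib
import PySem

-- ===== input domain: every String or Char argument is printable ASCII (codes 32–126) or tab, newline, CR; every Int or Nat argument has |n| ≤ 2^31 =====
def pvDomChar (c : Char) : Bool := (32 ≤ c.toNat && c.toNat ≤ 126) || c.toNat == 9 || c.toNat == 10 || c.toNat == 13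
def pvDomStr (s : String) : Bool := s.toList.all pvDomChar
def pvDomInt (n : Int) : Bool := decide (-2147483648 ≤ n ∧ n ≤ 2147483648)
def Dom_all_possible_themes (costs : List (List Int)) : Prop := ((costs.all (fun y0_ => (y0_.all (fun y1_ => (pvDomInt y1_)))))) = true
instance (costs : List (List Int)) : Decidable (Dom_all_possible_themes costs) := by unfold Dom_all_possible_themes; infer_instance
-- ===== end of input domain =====

-- B replaces A's recursive backtracking DFS by an iterative layer-by-layer build of
-- partial index lists; same output, same order (objective: alternative decomposition).

-- ===== PORT A =====
-- A's recursion: generate_combinations(curr_index, prev_index, result); the inner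
-- 'for i in range(...)' loop is the mutually recursive genLoopA over the range list.
mutual
def genA : List (List Int) → List Int → Int → List (List Int)
  | [], curr, _ => [curr]                                   -- len(curr)==len(costs): emit copy
  | row :: rest, curr, prev =>
      genLoopA rest curr prev (PySem.List.pyRange 0 row.length 1)
  termination_by rows _ _ => (rows.length, 0)
  decreasing_by simp [Prod.lex_def]
def genLoopA : List (List Int) → List Int → Int → List Int → List (List Int)
  | _, _, _, [] => []
  | rest, curr, prev, i :: is =>
      (if i ≠ prev then genA rest (curr ++ [i]) i else []) ++ genLoopA rest curr prev is
  termination_by rest _ _ is => (rest.length, is.length + 1)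
  decreasing_by
    · simp [Prod.lex_def]
    · simp [Prod.lex_def]
end

def all_possible_themes (costs : List (List Int)) : List (List Int) :=
  genA costs [] (-1)

-- ===== PORT B =====
-- p[-1] if p else -1
def prevOfB (p : List Int) : Int := (PySem.List.pyGet? p (-1)).getD (-1)

def all_possible_themes_alt (costs : List (List Int)) : List (List Int) :=
  costs.foldl
    (fun partials row =>
      partials.foldl
        (fun acc p =>
          (PySem.List.pyRange 0 row.length 1).foldl
            (fun acc2 i => if i ≠ prevOfB p then acc2 ++ [p ++ [i]] else acc2)
            acc)
        [])
    [[]]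

-- ===== PRECONDITION & SPEC =====
def Spec_all_possible_themes (costs : List (List Int)) (out : List (List Int)) : Prop := out = all_possible_themes_alt costs
instance (costs : List (List Int)) (out : List (List Int)) : Decidable (Spec_all_possible_themes costs out) := by unfold Spec_all_possible_themes; infer_instance

-- ===== CLAIM (what is proved, stated in full; the proofs are below) =====
def Claim_equal_all_possible_themes : Prop := ∀ (costs : List (List Int)), Dom_all_possible_themes costs → Spec_all_possible_themes costs (all_possible_themes costs)

-- ===== LEMMAS AND PROOFS =====

theorem prevOfB_append (p : List Int) (i : Int) : prevOfB (p ++ [i]) = i := by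
  simp [prevOfB, PySem.List.pyGet?, PySem.List.pyIdx?]

theorem prevOfB_nil : prevOfB ([] : List Int) = -1 := by decide

-- inner range loop as a flatMap
theorem inner_loop_eq (is : List Int) (prev : Int) (p : List Int) (acc : List (List Int)) :
    is.foldl (fun acc2 i => if i ≠ prev then acc2 ++ [p ++ [i]] else acc2) acc
      = acc ++ is.flatMap (fun i => if i ≠ prev then [p ++ [i]] else []) := by
  induction is generalizing acc with
  | nil => simp
  | cons i is ih =>
      by_cases h : i = prev
      · simpa [h] using ih acc
      · simp only [List.foldl_cons, List.flatMap_cons, ih]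
        simp [h]

-- middle partials loop as a flatMap
theorem mid_loop_eq (ps : List (List Int)) (F : List Int → List (List Int)) (acc : List (List Int)) :
    ps.foldl (fun acc p => acc ++ F p) acc = acc ++ ps.flatMap F := by
  induction ps generalizing acc with
  | nil => simp
  | cons p ps ih => simp [ih, List.append_assoc]

theorem genLoopA_eq (rest : List (List Int)) (curr : List Int) (prev : Int) (is : List Int) :
    genLoopA rest curr prev is
      = is.flatMap (fun i => if i ≠ prev then genA rest (curr ++ [i]) i else []) := by
  induction is with
  | nil => simp [genLoopA]
  | cons i is ih => simp [genLoopA, ih]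

theorem main_inv (rows : List (List Int)) (ps : List (List Int)) :
    rows.foldl
      (fun partials row =>
        partials.foldl
          (fun acc p =>
            (PySem.List.pyRange 0 row.length 1).foldl
              (fun acc2 i => if i ≠ prevOfB p then acc2 ++ [p ++ [i]] else acc2)
              acc)
          [])
      ps
    = ps.flatMap (fun p => genA rows p (prevOfB p)) := by
  induction rows generalizing ps with
  | nil => simp [genA]
  | cons row rest ih =>
      rw [List.foldl_cons, ih]
      have hstep :
          (ps.foldl
            (fun acc p =>
              (PySem.List.pyRange 0 row.length 1).foldl
                (fun acc2 i => if i ≠ prevOfB p then acc2 ++ [p ++ [i]] else acc2)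
                acc)
            [])
          = ps.flatMap (fun p =>
              (PySem.List.pyRange 0 row.length 1).flatMap
                (fun i => if i ≠ prevOfB p then [p ++ [i]] else [])) := by
        have : ∀ (acc : List (List Int)) p,
            (PySem.List.pyRange 0 row.length 1).foldl
              (fun acc2 i => if i ≠ prevOfB p then acc2 ++ [p ++ [i]] else acc2) acc
            = acc ++ (PySem.List.pyRange 0 row.length 1).flatMap
                (fun i => if i ≠ prevOfB p then [p ++ [i]] else []) := fun acc p =>
          inner_loop_eq _ _ _ _
        calc ps.foldl _ [] = ps.foldl
              (fun acc p => acc ++ (PySem.List.pyRange 0 row.length 1).flatMap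
                (fun i => if i ≠ prevOfB p then [p ++ [i]] else [])) [] := by
                exact PySem.List.foldl_congr_mem _ _ _ _ (fun acc p _ => this acc p)
          _ = _ := by rw [mid_loop_eq]; simp
      rw [hstep, List.flatMap_assoc]
      apply List.flatMap_congr
      intro p _
      rw [List.flatMap_assoc]
      simp [genA, genLoopA_eq]
      apply List.flatMap_congr
      intro i _
      by_cases h : i = prevOfB p
      · simp [h]
      · simp [h, prevOfB_append]

-- ===== VERDICT (by name: the statement is the Claim_ definition above) =====
theorem all_possible_themes_spec : Claim_equal_all_possible_themes := by
  intro costs _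
  unfold Spec_all_possible_themes all_possible_themes all_possible_themes_alt
  rw [main_inv]
  simp [prevOfB_nil]
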